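-- pv_equiv track=rewrite | github.com/ericduericdu/University-Database | insert.py | check_student
-- ===== SOURCE A (Python) =====
-- def check_student(students,courses):
--     student_hash = {}
--     student_conflict = []
--     sid_conflict = []
--     for i in range(len(students)):
--         for j in range(len(students[i])):
--             if(courses[i][0][1][-1] != "6"):
--                 continue
--             sid_term = str(students[i][j][1])+str(courses[i][0][1])
--             if sid_term in student_hash:
--
--                 if students[i][j][4] != student_hash[sid_term][0]: #Different Level
--                     sid_conflict.append(students[i][j][1])
--                     sid_conflict.append(student_hash[sid_term][5])
--                     student_conflict.append(i)
--                     student_conflict.append(student_hash[sid_term][4])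
--                 if students[i][j][6] != student_hash[sid_term][1]: #Different Class
--                     sid_conflict.append(students[i][j][1])
--                     sid_conflict.append(student_hash[sid_term][5])
--                     student_conflict.append(i)
--                     student_conflict.append(student_hash[sid_term][4])
--                 if students[i][j][7] != student_hash[sid_term][2]: #Different Major
--                     sid_conflict.append(students[i][j][1])
--                     sid_conflict.append(student_hash[sid_term][5])
--                     student_conflict.append(i)
--                     student_conflict.append(student_hash[sid_term][4])
--                 if students[i][j][9] != student_hash[sid_term][3]: #Different Status
--                     sid_conflict.append(students[i][j][1])
--                     sid_conflict.append(student_hash[sid_term][5])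
--                     student_conflict.append(i)
--                     student_conflict.append(student_hash[sid_term][4])
--
--             else:
--                 student_hash[sid_term] = (students[i][j][4],students[i][j][6],students[i][j][7],students[i][j][9],i,students[i][j][1])
--
--     return set(student_conflict),set(sid_conflict)
-- ===== SOURCE B (Python) =====
-- def check_student(students, courses):
--     # Pass 1: index the first-seen record (its four tracked fields, i, sid)
--     # for every sid+term key among term-6 rows.
--     ref = {}
--     for i, row in enumerate(students):
--         for rec in row:
--             if courses[i][0][1][-1] != "6":
--                 continue
--             ref.setdefault(rec[1] + courses[i][0][1],
--                            (rec[4], rec[6], rec[7], rec[9], i, rec[1]))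
--     # Pass 2: compare every record (the reference included, which trivially
--     # agrees with itself) against its group's reference.
--     conf_i = []
--     conf_sid = []
--     for i, row in enumerate(students):
--         for rec in row:
--             if courses[i][0][1][-1] != "6":
--                 continue
--             lvl, cls, maj, st, i0, sid0 = ref[rec[1] + courses[i][0][1]]
--             for cur, old in ((rec[4], lvl), (rec[6], cls), (rec[7], maj), (rec[9], st)):
--                 if cur != old:
--                     conf_sid += [rec[1], sid0]
--                     conf_i += [i, i0]
--     return set(conf_i), set(conf_sid)
-- ===== Notes on version B (the rewrite author's own statement) =====
-- stated objective: alternative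
-- what changed: A interleaves building the first-seen hash with conflict detection in one pass; B first builds the complete first-occurrence reference index, then a second pass compares every record (reference included) against its group's reference with a data-driven loop over the four tracked fields, so the membership branch of A disappears.
import Mathlib
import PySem

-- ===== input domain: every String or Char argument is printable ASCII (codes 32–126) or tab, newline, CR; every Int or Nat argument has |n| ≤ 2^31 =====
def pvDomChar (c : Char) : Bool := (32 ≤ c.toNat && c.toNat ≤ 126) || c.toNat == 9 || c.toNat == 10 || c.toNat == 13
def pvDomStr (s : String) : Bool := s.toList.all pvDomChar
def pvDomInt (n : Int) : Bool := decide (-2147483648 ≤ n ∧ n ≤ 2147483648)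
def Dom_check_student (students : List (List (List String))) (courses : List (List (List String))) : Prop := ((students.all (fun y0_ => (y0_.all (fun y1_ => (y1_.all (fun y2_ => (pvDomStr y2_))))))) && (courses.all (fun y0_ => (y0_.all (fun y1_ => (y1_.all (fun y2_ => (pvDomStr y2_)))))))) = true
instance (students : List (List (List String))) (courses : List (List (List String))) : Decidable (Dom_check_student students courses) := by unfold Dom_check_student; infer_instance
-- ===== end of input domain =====

-- B replaces A's interleaved build-and-compare loop by two passes: first build the complete
-- first-occurrence reference index, then compare every record against its group's reference
-- (the reference trivially agrees with itself), with the four field checks as one data loop.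

-- shared transliterations of the record/course accesses both Pythons write verbatim
-- rec[k] for a record field (in range on Pre_; .getD "" only totalises)
def pvFld (rec : List String) (k : Int) : String := (PySem.List.pyGet? rec k).getD ""
-- courses[i][0][1] (in range on Pre_; .getD only totalises)
def pvTerm (courses : List (List (List String))) (i : Int) : String :=
  (PySem.List.pyGet? ((PySem.List.pyGet? ((PySem.List.pyGet? courses i).getD []) 0).getD []) 1).getD ""
-- courses[i][0][1][-1] == "6"  (Python 'continue's on the negation)
def pvCond (courses : List (List (List String))) (i : Int) : Bool :=
  PySem.Str.pyGet? (pvTerm courses i) (-1) == some '6'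

-- ===== PORT A =====
-- one inner-loop body of A, on the pair (i, students[i][j]); state = (hash, (student_conflict, sid_conflict))
def pvStepA (courses : List (List (List String)))
    (st : PySem.Dict String (String × String × String × String × Int × String) × (List Int × List String))
    (e : Int × List String) :
    PySem.Dict String (String × String × String × String × Int × String) × (List Int × List String) :=
  if pvCond courses e.1 then
    let key := pvFld e.2 1 ++ pvTerm courses e.1
    match st.1.get? key with
    | some (lvl, cls, maj, stt, i0, sid0) =>
        let p1 := if pvFld e.2 4 ≠ lvl then (st.2.1 ++ [e.1, i0], st.2.2 ++ [pvFld e.2 1, sid0]) else st.2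
        let p2 := if pvFld e.2 6 ≠ cls then (p1.1 ++ [e.1, i0], p1.2 ++ [pvFld e.2 1, sid0]) else p1
        let p3 := if pvFld e.2 7 ≠ maj then (p2.1 ++ [e.1, i0], p2.2 ++ [pvFld e.2 1, sid0]) else p2
        let p4 := if pvFld e.2 9 ≠ stt then (p3.1 ++ [e.1, i0], p3.2 ++ [pvFld e.2 1, sid0]) else p3
        (st.1, p4)
    | none =>
        (st.1.insert key (pvFld e.2 4, pvFld e.2 6, pvFld e.2 7, pvFld e.2 9, e.1, pvFld e.2 1), st.2)
  else st

def check_student (students : List (List (List String))) (courses : List (List (List String))) : List Int × List String :=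
  let fin := (PySem.List.enumerate students 0).foldl
    (fun st p => p.2.foldl (fun st rec => pvStepA courses st (p.1, rec)) st)
    (PySem.Dict.empty, ([], []))
  (PySem.Set.ofList fin.2.1, PySem.Set.ofList fin.2.2)

-- ===== PORT B =====
-- pass 1 body: ref.setdefault(key, fields)
def pvStep1 (courses : List (List (List String)))
    (d : PySem.Dict String (String × String × String × String × Int × String))
    (e : Int × List String) : PySem.Dict String (String × String × String × String × Int × String) :=
  if pvCond courses e.1 then
    d.setdefault (pvFld e.2 1 ++ pvTerm courses e.1)
      (pvFld e.2 4, pvFld e.2 6, pvFld e.2 7, pvFld e.2 9, e.1, pvFld e.2 1)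
  else d

-- pass 2 body: compare the record's four fields against its reference
-- (ref[key] always succeeds for keys reached here; .getD only totalises)
def pvStep2 (courses : List (List (List String)))
    (ref : PySem.Dict String (String × String × String × String × Int × String))
    (acc : List Int × List String) (e : Int × List String) : List Int × List String :=
  if pvCond courses e.1 then
    match (ref.get? (pvFld e.2 1 ++ pvTerm courses e.1)).getD ("", "", "", "", 0, "") with
    | (lvl, cls, maj, stt, i0, sid0) =>
      [(pvFld e.2 4, lvl), (pvFld e.2 6, cls), (pvFld e.2 7, maj), (pvFld e.2 9, stt)].foldl
        (fun acc p => if p.1 ≠ p.2 then (acc.1 ++ [e.1, i0], acc.2 ++ [pvFld e.2 1, sid0]) else acc) acc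
  else acc

def check_student_alt (students : List (List (List String))) (courses : List (List (List String))) : List Int × List String :=
  let ref := (PySem.List.enumerate students 0).foldl
    (fun d p => p.2.foldl (fun d rec => pvStep1 courses d (p.1, rec)) d) PySem.Dict.empty
  let acc := (PySem.List.enumerate students 0).foldl
    (fun a p => p.2.foldl (fun a rec => pvStep2 courses ref a (p.1, rec)) a) ([], [])
  (PySem.Set.ofList acc.1, PySem.Set.ofList acc.2)

-- ===== PRECONDITION & SPEC =====
-- Pre_ excludes exactly the inputs where Python A raises an IndexError: a non-empty students[i]
-- with courses[i][0][1][-1] unreachable, or a term-6 row holding a record of fewer than 10 fields.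
def Pre_check_student (students : List (List (List String))) (courses : List (List (List String))) : Prop :=
  ∀ i ∈ List.range students.length,
    students.getD i [] ≠ [] →
      (i < courses.length ∧ courses.getD i [] ≠ [] ∧
       2 ≤ ((courses.getD i []).getD 0 []).length ∧
       (((courses.getD i []).getD 0 []).getD 1 "") ≠ "" ∧
       ((((courses.getD i []).getD 0 []).getD 1 "").toList.getLast? = some '6' →
         ∀ rec ∈ students.getD i [], 10 ≤ rec.length))
instance (students : List (List (List String))) (courses : List (List (List String))) : Decidable (Pre_check_student students courses) := by unfold Pre_check_student; infer_instance

def pvWitness_check_student : List (List (List String)) × List (List (List String)) :=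
  ([[["s", "id1", "x", "x", "L", "x", "C", "M", "x", "S"]]], [[["c", "T6"]]])

def Spec_check_student (students : List (List (List String))) (courses : List (List (List String))) (out : List Int × List String) : Prop := out = check_student_alt students courses
instance (students : List (List (List String))) (courses : List (List (List String))) (out : List Int × List String) : Decidable (Spec_check_student students courses out) := by unfold Spec_check_student; infer_instance

-- ===== CLAIM (what is proved, stated in full; the proofs are below) =====
def Claim_equal_check_student : Prop := ∀ (students : List (List (List String))) (courses : List (List (List String))), Dom_check_student students courses → Pre_check_student students courses → Spec_check_student students courses (check_student students courses)

-- ===== LEMMAS AND PROOFS =====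

-- flatten the nested (rows, records) folds of both ports into one fold over (i, rec) events
def pvEvents (students : List (List (List String))) : List (Int × List String) :=
  (PySem.List.enumerate students 0).flatMap (fun p => p.2.map (fun r => (p.1, r)))

theorem pvFoldFlatten {σ : Type} (f : σ → Int × List String → σ) :
    ∀ (rows : List (Int × List (List String))) (s : σ),
      rows.foldl (fun s p => p.2.foldl (fun s r => f s (p.1, r)) s) s
        = (rows.flatMap (fun p => p.2.map (fun r => (p.1, r)))).foldl f s := by
  intro rows
  induction rows with
  | nil => intro s; rfl
  | cons p rows ih =>
      intro s
      simp only [List.foldl_cons, List.flatMap_cons, List.foldl_append, List.foldl_map, ih]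

-- pass 1 never overwrites: an existing binding survives the rest of the fold
theorem pvStep1_mono (courses : List (List (List String))) :
    ∀ (es : List (Int × List String)) (d : PySem.Dict String (String × String × String × String × Int × String))
      (k : String) (v : String × String × String × String × Int × String),
      d.get? k = some v → (es.foldl (pvStep1 courses) d).get? k = some v := by
  intro es
  induction es with
  | nil => intro d k v h; exact h
  | cons e es ih =>
      intro d k v h
      simp only [List.foldl_cons]
      apply ih
      unfold pvStep1
      split
      · by_cases hk : k = pvFld e.2 1 ++ pvTerm courses e.1
        · subst hk
          rw [PySem.Dict.get?_setdefault_self, h]; rfl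
        · rw [PySem.Dict.get?_setdefault_of_ne _ _ hk, h]
      · exact h

-- main invariant: if running pass 1 from the current hash over the remaining events yields REF,
-- then A's conflict lists over those events equal B's pass-2 lists against REF
theorem pvMain (courses : List (List (List String))) :
    ∀ (es : List (Int × List String)) (d : PySem.Dict String (String × String × String × String × Int × String))
      (acc : List Int × List String)
      (REF : PySem.Dict String (String × String × String × String × Int × String)),
      es.foldl (pvStep1 courses) d = REF →
      (es.foldl (pvStepA courses) (d, acc)).2 = es.foldl (pvStep2 courses REF) acc := by
  intro es
  induction es with
  | nil => intro d acc REF _; rfl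
  | cons e es ih =>
      intro d acc REF hREF
      simp only [List.foldl_cons] at hREF ⊢
      by_cases hc : pvCond courses e.1
      · rw [pvStep1, if_pos hc] at hREF
        cases hk : d.get? (pvFld e.2 1 ++ pvTerm courses e.1) with
        | some v =>
            obtain ⟨lvl, cls, maj, stt, i0, sid0⟩ := v
            rw [PySem.Dict.setdefault_of_contains _ _
                (by rw [PySem.Dict.contains_eq_isSome_get?, hk]; rfl)] at hREF
            have hREFget : REF.get? (pvFld e.2 1 ++ pvTerm courses e.1)
                = some (lvl, cls, maj, stt, i0, sid0) := by
              rw [← hREF]; exact pvStep1_mono courses es d _ _ hk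
            have hA : pvStepA courses (d, acc) e = (d, pvStep2 courses REF acc e) := by
              simp only [pvStepA, pvStep2, hc, if_true, hk, hREFget, Option.getD_some, List.foldl]
            rw [hA]
            exact ih d _ REF hREF
        | none =>
            rw [PySem.Dict.setdefault_of_not_contains _ _
                (by rw [PySem.Dict.contains_eq_isSome_get?, hk]; rfl)] at hREF
            have hREFget : REF.get? (pvFld e.2 1 ++ pvTerm courses e.1)
                = some (pvFld e.2 4, pvFld e.2 6, pvFld e.2 7, pvFld e.2 9, e.1, pvFld e.2 1) := by
              rw [← hREF]
              exact pvStep1_mono courses es _ _ _ (PySem.Dict.get?_insert_self _ _ _)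
            have hB : pvStep2 courses REF acc e = acc := by
              simp only [pvStep2, hc, if_true, hREFget, Option.getD_some, List.foldl, ne_eq,
                not_true_eq_false, if_false]
            have hA : pvStepA courses (d, acc) e
                = (d.insert (pvFld e.2 1 ++ pvTerm courses e.1)
                    (pvFld e.2 4, pvFld e.2 6, pvFld e.2 7, pvFld e.2 9, e.1, pvFld e.2 1), acc) := by
              simp only [pvStepA, hc, if_true, hk]
            rw [hA, hB]
            exact ih _ _ REF hREF
      · have hcf : pvCond courses e.1 = false := by simpa using hc
        have h1 : pvStep1 courses d e = d := by simp only [pvStep1, hcf, if_false, Bool.false_eq_true]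
        have hA : pvStepA courses (d, acc) e = (d, acc) := by simp only [pvStepA, hcf, if_false, Bool.false_eq_true]
        have hB : pvStep2 courses REF acc e = acc := by simp only [pvStep2, hcf, if_false, Bool.false_eq_true]
        rw [h1] at hREF
        rw [hA, hB]
        exact ih d acc REF hREF

-- ===== VERDICT (by name: the statement is the Claim_ definition above) =====
theorem check_student_spec : Claim_equal_check_student := by
  intro students courses _ _
  unfold Spec_check_student check_student check_student_alt
  simp only [pvFoldFlatten]
  exact congrArg (fun q : List Int × List String => (PySem.Set.ofList q.1, PySem.Set.ofList q.2))
    (pvMain courses _ PySem.Dict.empty ([], []) _ rfl)
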